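-- pv_equiv track=rewrite | github.com/KKrisztian2/WIQPM2_mest_int | WIQPM2_vrp_tabu.py | dstnc
-- ===== SOURCE A (Python) =====
-- def dstnc(dict, v, veh):
--     dist = [0] * veh
--     prev = [0] * veh
--     for i in range(len(v)):
--         dist[v[i][1]] += dict[prev[v[i][1]], v[i][0]]
--         prev[v[i][1]] = v[i][0]
--     for i in range(veh):
--         dist[i] += dict[prev[i], 0]
--     return dist
-- ===== SOURCE B (Python) =====
-- def dstnc(dict, v, veh):
--     routes = [[] for _ in range(veh)]
--     for node, k in v:
--         routes[k].append(node)
--     out = []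
--     for r in routes:
--         path = [0] + r + [0]
--         out.append(sum(dict[a, b] for a, b in zip(path, path[1:])))
--     return out
-- ===== Notes on version B (the rewrite author's own statement) =====
-- stated objective: alternative
-- what changed: B replaces A's in-place dist/prev accumulator arrays with a group-then-sum decomposition: one pass groups v into per-vehicle routes, then each full depot-to-depot path is summed over consecutive pairs.
-- outside the precondition, e.g. on dstnc({(0, 1): 5, (1, 0): 7}, [(1, 0)], 1): A returns [12], B returns [12]; on dstnc({(0, 1): 5, (1, 0): 7, (0, 0): 3, (1, 1): 4}, [(1, -1)], 1): A returns [12], B returns [12]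
import Mathlib
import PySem

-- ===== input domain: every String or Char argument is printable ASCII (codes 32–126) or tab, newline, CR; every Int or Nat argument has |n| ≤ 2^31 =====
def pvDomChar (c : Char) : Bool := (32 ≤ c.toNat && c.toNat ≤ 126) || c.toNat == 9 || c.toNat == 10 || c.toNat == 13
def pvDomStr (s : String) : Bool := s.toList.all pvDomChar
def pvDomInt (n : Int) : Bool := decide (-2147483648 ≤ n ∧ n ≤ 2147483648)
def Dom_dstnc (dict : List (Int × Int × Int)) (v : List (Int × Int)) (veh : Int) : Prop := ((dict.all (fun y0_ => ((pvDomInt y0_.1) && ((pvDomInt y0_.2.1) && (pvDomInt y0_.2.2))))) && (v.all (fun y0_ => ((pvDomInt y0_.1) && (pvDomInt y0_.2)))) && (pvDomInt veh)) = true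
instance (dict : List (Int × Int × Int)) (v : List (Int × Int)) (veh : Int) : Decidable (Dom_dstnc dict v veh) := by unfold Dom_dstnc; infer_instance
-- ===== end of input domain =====

-- B regroups v into per-vehicle routes and sums each full depot-to-depot path,
-- instead of A's in-place dist/prev accumulator arrays; same cost, different decomposition.


-- ===== PORT A =====
-- dict[(a,b)] : the triples encode the dict's items ((a,b) ↦ z); on a duplicated key
-- Python's dict keeps the last value, so the lookup takes the last match.
-- Under Pre_ every looked-up key is present, so the default 0 is never returned.
def lookupD (d : List (Int × Int × Int)) (a b : Int) : Int :=
  d.foldl (fun acc e => if e.1 = a ∧ e.2.1 = b then e.2.2 else acc) 0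

-- literal port of A: dist/prev arrays of length veh, one pass over v updating both
-- in place, then one pass over range(veh) adding the return-to-depot leg.
-- Indices are .toNat; Pre_ confines the claim to in-range non-negative vehicle indices.
def dstnc (dict : List (Int × Int × Int)) (v : List (Int × Int)) (veh : Int) : List Int :=
  let dist := List.replicate veh.toNat (0 : Int)
  let prev := List.replicate veh.toNat (0 : Int)
  let s := v.foldl (fun (s : List Int × List Int) p =>
    (s.1.set p.2.toNat (s.1.getD p.2.toNat 0 + lookupD dict (s.2.getD p.2.toNat 0) p.1),
     s.2.set p.2.toNat p.1)) (dist, prev)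
  (List.range veh.toNat).foldl
    (fun d i => d.set i (d.getD i 0 + lookupD dict (s.2.getD i 0) 0)) s.1

-- ===== PORT B =====
-- sum of dict[(path[j], path[j+1])] over consecutive pairs of a path
def segSum (d : List (Int × Int × Int)) : List Int → Int
  | a :: b :: t => lookupD d a b + segSum d (b :: t)
  | _ => 0

-- literal port of B: group v into per-vehicle routes, then sum each path [0]+r+[0].
def dstnc_alt (dict : List (Int × Int × Int)) (v : List (Int × Int)) (veh : Int) : List Int :=
  let routes := v.foldl
    (fun (rs : List (List Int)) p => rs.set p.2.toNat (rs.getD p.2.toNat [] ++ [p.1]))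
    (List.replicate veh.toNat ([] : List Int))
  routes.map (fun r => segSum dict (0 :: (r ++ [0])))

-- ===== PRECONDITION & SPEC =====
-- Pre_ excludes v entries whose vehicle index is outside [0, veh) (out of range raises
-- IndexError; a negative index within range uses Python's wraparound, a corner the ports
-- do not model, though both Python programs agree there), and it requires the dict to be a
-- full distance matrix over the node set plus the depot — slightly stronger than the exact
-- set of keys A touches, so it also excludes some inputs on which A returns (see cites).
def Pre_dstnc (dict : List (Int × Int × Int)) (v : List (Int × Int)) (veh : Int) : Prop :=
  (∀ p ∈ v, 0 ≤ p.2 ∧ p.2 < veh) ∧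
  (∀ a ∈ (0 :: v.map Prod.fst), ∀ b ∈ (0 :: v.map Prod.fst),
    ∃ e ∈ dict, e.1 = a ∧ e.2.1 = b)
instance (dict : List (Int × Int × Int)) (v : List (Int × Int)) (veh : Int) : Decidable (Pre_dstnc dict v veh) := by unfold Pre_dstnc; infer_instance

def pvWitness_dstnc : (List (Int × Int × Int)) × (List (Int × Int)) × Int :=
  ([(0, 0, 1), (0, 1, 2), (1, 0, 3), (1, 1, 4)], [(1, 0)], 1)

def Spec_dstnc (dict : List (Int × Int × Int)) (v : List (Int × Int)) (veh : Int) (out : List Int) : Prop := out = dstnc_alt dict v veh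
instance (dict : List (Int × Int × Int)) (v : List (Int × Int)) (veh : Int) (out : List Int) : Decidable (Spec_dstnc dict v veh out) := by unfold Spec_dstnc; infer_instance

-- ===== CLAIM (what is proved, stated in full; the proofs are below) =====
def Claim_equal_dstnc : Prop := ∀ (dict : List (Int × Int × Int)) (v : List (Int × Int)) (veh : Int), Dom_dstnc dict v veh → Pre_dstnc dict v veh → Spec_dstnc dict v veh (dstnc dict v veh)

-- ===== LEMMAS AND PROOFS =====

-- the node at which a route r (starting from the depot 0) ends
def lastOf (r : List Int) : Int := r.foldl (fun _ x => x) 0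

theorem lastOf_append (r : List Int) (x : Int) : lastOf (r ++ [x]) = x := by
  simp [lastOf]

theorem segSum_snoc (d : List (Int × Int × Int)) :
    ∀ (r : List Int) (a x : Int),
      segSum d (a :: (r ++ [x])) = segSum d (a :: r) + lookupD d (r.foldl (fun _ y => y) a) x := by
  intro r
  induction r with
  | nil => intro a x; simp [segSum]
  | cons b t ih =>
      intro a x
      show segSum d (a :: b :: (t ++ [x])) = _
      rw [segSum, ih b x, segSum]
      simp [List.foldl]
      ring

theorem segSum_cost_snoc (d : List (Int × Int × Int)) (r : List Int) (x : Int) :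
    segSum d (0 :: (r ++ [x])) = segSum d (0 :: r) + lookupD d (lastOf r) x :=
  segSum_snoc d r 0 x

-- invariant of the main loop: A's (dist, prev) state is the image of B's routes state
theorem main_inv (d : List (Int × Int × Int)) :
    ∀ (v : List (Int × Int)) (routes : List (List Int)),
      (∀ p ∈ v, 0 ≤ p.2 ∧ p.2.toNat < routes.length) →
      v.foldl (fun (s : List Int × List Int) p =>
          (s.1.set p.2.toNat (s.1.getD p.2.toNat 0 + lookupD d (s.2.getD p.2.toNat 0) p.1),
           s.2.set p.2.toNat p.1))
        (routes.map (fun r => segSum d (0 :: r)), routes.map lastOf)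
      = ((v.foldl (fun (rs : List (List Int)) p =>
            rs.set p.2.toNat (rs.getD p.2.toNat [] ++ [p.1])) routes).map (fun r => segSum d (0 :: r)),
         (v.foldl (fun (rs : List (List Int)) p =>
            rs.set p.2.toNat (rs.getD p.2.toNat [] ++ [p.1])) routes).map lastOf) := by
  intro v
  induction v with
  | nil => intro routes _; simp
  | cons p t ih =>
      intro routes h
      have hk : p.2.toNat < routes.length := (h p (by simp)).2
      have hstep :
          ((routes.map (fun r => segSum d (0 :: r))).set p.2.toNat
              ((routes.map (fun r => segSum d (0 :: r))).getD p.2.toNat 0 +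
                lookupD d ((routes.map lastOf).getD p.2.toNat 0) p.1),
           (routes.map lastOf).set p.2.toNat p.1)
          = ((routes.set p.2.toNat (routes.getD p.2.toNat [] ++ [p.1])).map (fun r => segSum d (0 :: r)),
             (routes.set p.2.toNat (routes.getD p.2.toNat [] ++ [p.1])).map lastOf) := by
        have hget : routes.getD p.2.toNat [] = routes[p.2.toNat] := List.getD_eq_getElem routes [] hk
        simp only [Prod.mk.injEq]
        refine ⟨?_, ?_⟩
        · rw [hget, List.map_set,
            List.getD_eq_getElem _ (0 : Int) (by simpa using hk), List.getElem_map,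
            List.getD_eq_getElem _ (0 : Int) (by simpa using hk), List.getElem_map,
            segSum_cost_snoc]
        · rw [hget, List.map_set, lastOf_append]
      rw [List.foldl_cons, List.foldl_cons, hstep, ih]
      intro q hq
      refine ⟨(h q (by simp [hq])).1, ?_⟩
      simpa using (h q (by simp [hq])).2

-- the grouping fold preserves the number of routes
theorem groupFold_length (v : List (Int × Int)) :
    ∀ (routes : List (List Int)),
      (v.foldl (fun (rs : List (List Int)) p =>
        rs.set p.2.toNat (rs.getD p.2.toNat [] ++ [p.1])) routes).length = routes.length := by
  induction v with
  | nil => intro routes; rfl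
  | cons p t ih => intro routes; rw [List.foldl_cons, ih, List.length_set]

-- every step of the final fold sets one index, so length is preserved
theorem setFold_length (f : Nat → Int) :
    ∀ (ns : List Nat) (l : List Int),
      (ns.foldl (fun d i => d.set i (d.getD i 0 + f i)) l).length = l.length := by
  intro ns
  induction ns with
  | nil => intro l; rfl
  | cons i t ih => intro l; rw [List.foldl_cons, ih, List.length_set]

-- the final range-fold, element by element
theorem finalFold_getElem? (f : Nat → Int) :
    ∀ (n : Nat) (l : List Int), n ≤ l.length → ∀ (j : Nat),
      ((List.range n).foldl (fun d i => d.set i (d.getD i 0 + f i)) l)[j]?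
        = if j < n then some (l.getD j 0 + f j) else l[j]? := by
  intro n
  induction n with
  | zero => intro l _ j; simp
  | succ m ih =>
      intro l hn j
      have hm : m ≤ l.length := Nat.le_of_succ_le hn
      have hml : m < l.length := hn
      rw [List.range_succ, List.foldl_append, List.foldl_cons, List.foldl_nil]
      have hlenf : ((List.range m).foldl (fun d i => d.set i (d.getD i 0 + f i)) l).length
          = l.length := setFold_length f (List.range m) l
      have hgm : ((List.range m).foldl (fun d i => d.set i (d.getD i 0 + f i)) l)[m]? = l[m]? := by
        rw [ih l hm m]; simp
      have hgetD : ((List.range m).foldl (fun d i => d.set i (d.getD i 0 + f i)) l).getD m 0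
          = l.getD m 0 := by
        rw [List.getD_eq_getElem?_getD, List.getD_eq_getElem?_getD, hgm]
      rw [hgetD, List.getElem?_set]
      by_cases hjm : m = j
      · subst hjm
        rw [if_pos rfl, if_pos (by omega : m < m + 1), if_pos (by omega : m < ((List.range m).foldl (fun d i => d.set i (d.getD i 0 + f i)) l).length)]
      · rw [if_neg hjm, ih l hm j]
        rcases Nat.lt_or_ge j m with hlt | hge
        · rw [if_pos hlt, if_pos (by omega : j < m + 1)]
        · rw [if_neg (by omega : ¬ j < m), if_neg (by omega : ¬ j < m + 1)]

-- ===== VERDICT (by name: the statement is the Claim_ definition above) =====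
theorem dstnc_spec : Claim_equal_dstnc := by
  intro dict v veh _ hpre
  show dstnc dict v veh = dstnc_alt dict v veh
  unfold dstnc dstnc_alt
  set n := veh.toNat with hn
  have hrep0 : (List.replicate n ([] : List Int)).map (fun r => segSum dict (0 :: r))
      = List.replicate n (0 : Int) := by simp [List.map_replicate, segSum]
  have hrepl : (List.replicate n ([] : List Int)).map lastOf = List.replicate n (0 : Int) := by
    simp [List.map_replicate, lastOf]
  have hran : ∀ p ∈ v, 0 ≤ p.2 ∧ p.2.toNat < (List.replicate n ([] : List Int)).length := by
    intro p hp
    obtain ⟨h0, h1⟩ := hpre.1 p hp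
    exact ⟨h0, by simp [hn]; omega⟩
  have hinv := main_inv dict v (List.replicate n ([] : List Int)) hran
  rw [hrep0, hrepl] at hinv
  set R := v.foldl (fun (rs : List (List Int)) p =>
      rs.set p.2.toNat (rs.getD p.2.toNat [] ++ [p.1])) (List.replicate n ([] : List Int)) with hR
  have hRlen : R.length = n := by rw [hR, groupFold_length]; simp
  simp only [hinv]
  apply List.ext_getElem?
  intro j
  have hlen : (R.map (fun r => segSum dict (0 :: r))).length = n := by simp [hRlen]
  rw [finalFold_getElem? _ n (R.map (fun r => segSum dict (0 :: r))) (le_of_eq hlen.symm) j]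
  by_cases hj : j < n
  · have hjR : j < R.length := by omega
    rw [if_pos hj]
    rw [List.getD_eq_getElem _ (0:Int) (by simpa [hlen] using hj)]
    simp only [List.getElem_map]
    rw [List.getD_eq_getElem _ (0:Int) (by simp [hRlen]; omega)]
    simp only [List.getElem_map]
    rw [List.getElem?_map, List.getElem?_eq_getElem hjR]
    simp only [Option.map_some]
    rw [segSum_cost_snoc]
  · rw [if_neg hj]
    have h1 : (R.map (fun r => segSum dict (0 :: r)))[j]? = none :=
      List.getElem?_eq_none (by omega)
    have h2 : (R.map (fun r => segSum dict (0 :: (r ++ [0]))))[j]? = none :=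
      List.getElem?_eq_none (by simp [hRlen]; omega)
    rw [h1, h2]
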